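-- pv_equiv track=rewrite | github.com/zinc0des/Biology-Meets-Programming | GibbsSampler.py | CountWithPseudocounts
-- ===== SOURCE A (Python) =====
-- def CountWithPseudocounts(Motifs):
--     t = len(Motifs)
--     k = len(Motifs[0])
--     # your code here
--     count = {} # initializing the count dictionary
--     for symbol in "ACTG":
--         count[symbol] = []
--         for j in range(k):
--             count[symbol].append(1)
--     for i in range(t):
--         for j in range(k):
--             symbol = Motifs[i][j]
--             count[symbol][j] += 1
--     return count
-- ===== SOURCE B (Python) =====
-- def CountWithPseudocounts(Motifs):
--     k = len(Motifs[0])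
--     count = {s: [] for s in "ACTG"}
--     for j in range(k):
--         freq = {s: 1 for s in "ACTG"}  # pseudocount of 1 per nucleotide
--         for m in Motifs:
--             freq[m[j]] += 1
--         for s in "ACTG":
--             count[s].append(freq[s])
--     return count
-- ===== Notes on version B (the rewrite author's own statement) =====
-- stated objective: alternative
-- what changed: B walks the matrix column-major, building a fresh per-column frequency dict (pseudocount 1) and appending the four tallies per column, instead of A's pre-built pseudocount lists mutated row-major by per-cell increments count[symbol][j] += 1.
import Mathlib
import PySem

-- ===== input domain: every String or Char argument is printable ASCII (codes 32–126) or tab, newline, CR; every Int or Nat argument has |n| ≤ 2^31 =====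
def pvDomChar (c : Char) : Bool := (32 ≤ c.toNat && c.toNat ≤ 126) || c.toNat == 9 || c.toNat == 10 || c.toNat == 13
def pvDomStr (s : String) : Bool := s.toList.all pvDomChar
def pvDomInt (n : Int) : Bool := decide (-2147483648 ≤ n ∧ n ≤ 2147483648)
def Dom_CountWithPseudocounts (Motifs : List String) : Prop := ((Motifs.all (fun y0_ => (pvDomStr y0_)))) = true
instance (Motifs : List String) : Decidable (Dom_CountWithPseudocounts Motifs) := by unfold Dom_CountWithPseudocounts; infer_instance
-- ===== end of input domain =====

-- B fills the count table column-by-column with a fresh per-column frequency dict instead of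
-- A's row-major double loop of in-place per-cell increments; return value only, no mutation.

-- ===== PORT A =====
-- A iterates "ACTG" (1-char strings as dict keys), builds pseudocount-1 lists by appending,
-- then increments count[Motifs[i][j]][j] for every cell, row-major.
def CountWithPseudocounts (Motifs : List String) : List (String × List Int) :=
  let t : Int := Motifs.length
  let k : Int := PySem.Str.len (PySem.List.pyGetD Motifs 0 "")
  let count0 : PySem.Dict String (List Int) :=
    (["A", "C", "T", "G"]).foldl
      (fun d sym =>
        (PySem.List.pyRange 0 k 1).foldl
          (fun d _ => d.modify sym [] (fun l => l ++ [(1 : Int)]))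
          (d.insert sym ([] : List Int)))
      PySem.Dict.empty
  let count :=
    (PySem.List.pyRange 0 t 1).foldl
      (fun d i =>
        (PySem.List.pyRange 0 k 1).foldl
          (fun d j =>
            d.modify (String.ofList [PySem.List.pyGetD (PySem.List.pyGetD Motifs i "").toList j ' ']) []
              (fun l => PySem.List.pySetD l j (PySem.List.pyGetD l j 0 + 1)))
          d)
      count0
  count.items

-- ===== PORT B =====
-- loop body of B: one column j — build a per-column frequency dict {s:1 for s in "ACTG"} then
-- freq[m[j]] += 1 per row, then append freq[s] per symbol. (The pyGetD/modify defaults are hit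
-- only where the Python raises IndexError/KeyError; those inputs are excluded by Pre_ below.)
def CountWithPseudocounts_altStep (Motifs : List String) (d : PySem.Dict String (List Int)) (j : Int) :
    PySem.Dict String (List Int) :=
  let freq : PySem.Dict String Int :=
    Motifs.foldl
      (fun f m => f.modify (String.ofList [PySem.List.pyGetD m.toList j ' ']) 0 (· + 1))
      ("ACTG".toList.foldl (fun f c => f.insert (String.ofList [c]) (1 : Int)) PySem.Dict.empty)
  "ACTG".toList.foldl
    (fun d c => d.modify (String.ofList [c]) [] (fun l => l ++ [freq.getD (String.ofList [c]) 0]))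
    d

def CountWithPseudocounts_alt (Motifs : List String) : List (String × List Int) :=
  let k : Int := PySem.Str.len (PySem.List.pyGetD Motifs 0 "")
  let count0 : PySem.Dict String (List Int) :=
    "ACTG".toList.foldl (fun d c => d.insert (String.ofList [c]) ([] : List Int)) PySem.Dict.empty
  let count := (PySem.List.pyRange 0 k 1).foldl (CountWithPseudocounts_altStep Motifs) count0
  count.items

-- ===== PRECONDITION & SPEC =====
-- Pre_ excludes exactly the inputs where A raises: empty Motifs (IndexError on Motifs[0]),
-- a row shorter than the first row (IndexError on Motifs[i][j]), and a character other than
-- A/C/T/G among the first len(Motifs[0]) characters of some row (KeyError on count[symbol]).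
def Pre_CountWithPseudocounts (Motifs : List String) : Prop :=
  Motifs ≠ [] ∧ ∀ s ∈ Motifs,
    Motifs.headI.toList.length ≤ s.toList.length ∧
    ((s.toList.take Motifs.headI.toList.length).all
      (fun c => c ∈ (['A', 'C', 'T', 'G'] : List Char))) = true
instance (Motifs : List String) : Decidable (Pre_CountWithPseudocounts Motifs) := by
  unfold Pre_CountWithPseudocounts; infer_instance
def pvWitness_CountWithPseudocounts : List String := (["ACGT", "TTAC", "GCGT"])

def Spec_CountWithPseudocounts (Motifs : List String) (out : List (String × List Int)) : Prop := out = CountWithPseudocounts_alt Motifs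
instance (Motifs : List String) (out : List (String × List Int)) : Decidable (Spec_CountWithPseudocounts Motifs out) := by unfold Spec_CountWithPseudocounts; infer_instance

-- ===== CLAIM (what is proved, stated in full; the proofs are below) =====
def Claim_equal_CountWithPseudocounts : Prop := ∀ (Motifs : List String), Dom_CountWithPseudocounts Motifs → Pre_CountWithPseudocounts Motifs → Spec_CountWithPseudocounts Motifs (CountWithPseudocounts Motifs)

-- ===== LEMMAS AND PROOFS =====

-- the four nucleotide characters and their 1-character-string dict keys
def pvChars : List Char := ['A', 'C', 'T', 'G']
def pvKey (c : Char) : String := String.ofList [c]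
def pvKeys4 : List String := ["A", "C", "T", "G"]

-- common abstract value: entry for nucleotide c is, per column j, 1 + (count of c in column j)
def pvTgt (rows : List (List Char)) (K : Nat) (c : Char) : List Int :=
  (List.range K).map (fun j => 1 + ((rows.map (fun r => r.getD j ' ')).count c : Int))

def pvItems (rows : List (List Char)) (K : Nat) : List (String × List Int) :=
  [("A", pvTgt rows K 'A'), ("C", pvTgt rows K 'C'), ("T", pvTgt rows K 'T'), ("G", pvTgt rows K 'G')]

theorem pvKey_inj {a b : Char} (h : pvKey a = pvKey b) : a = b := by
  have := congrArg String.toList h; simpa [pvKey] using this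

theorem pvKey_mem_keys4 {c : Char} (hc : c ∈ pvChars) : pvKey c ∈ pvKeys4 := by
  fin_cases hc <;> decide

theorem set_map_range {β : Type} (g : Nat → β) (n i : Nat) (v : β) (_h : i < n) :
    ((List.range n).map g).set i v = (List.range n).map (fun j => if j = i then v else g j) := by
  apply List.ext_getElem
  · simp
  · intro m h1 h2
    by_cases him : i = m
    · simp [him]
    · simp [him, Ne.symm him]

theorem constApp {α : Type} (s : String) (l : List α) :
    ∀ d : PySem.Dict String (List Int), d.contains s = true →
      ((l.foldl (fun d _ => d.modify s [] (fun x => x ++ [(1 : Int)])) d)).keys = d.keys ∧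
      ∀ s', ((l.foldl (fun d _ => d.modify s [] (fun x => x ++ [(1 : Int)])) d)).getD s' [] =
        if s' = s then d.getD s' [] ++ List.replicate l.length 1 else d.getD s' [] := by
  induction l with
  | nil => intro d hd; simp
  | cons x t ih =>
    intro d hd
    simp only [List.foldl_cons]
    have hd' : (d.modify s [] (fun x => x ++ [(1:Int)])).contains s = true := by
      rw [PySem.Dict.contains_modify]; simp [hd]
    obtain ⟨hk, hv⟩ := ih (d.modify s [] (fun x => x ++ [(1:Int)])) hd'
    constructor
    · rw [hk, PySem.Dict.keys_modify, PySem.Dict.keys_insert_of_contains _ _ hd]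
    · intro s'
      rw [hv s', PySem.Dict.getD_modify]
      by_cases h : s' = s
      · simp [h]; rw [← List.replicate_succ, List.replicate_succ']
      · simp [h]

theorem initFoldA (K : Nat) (syms : List String) (hnd : syms.Nodup) :
    ∀ d : PySem.Dict String (List Int), (∀ s ∈ syms, d.contains s = false) →
      (syms.foldl
        (fun d sym =>
          (PySem.List.pyRange 0 (K : Int) 1).foldl
            (fun d _ => d.modify sym [] (fun l => l ++ [(1 : Int)]))
            (d.insert sym ([] : List Int))) d).keys = d.keys ++ syms ∧
      ∀ s', (syms.foldl
        (fun d sym =>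
          (PySem.List.pyRange 0 (K : Int) 1).foldl
            (fun d _ => d.modify sym [] (fun l => l ++ [(1 : Int)]))
            (d.insert sym ([] : List Int))) d).getD s' [] =
        if s' ∈ syms then List.replicate K 1 else d.getD s' [] := by
  have hlen : (PySem.List.pyRange 0 (K : Int) 1).length = K := by
    simp [PySem.List.length_pyRange_one]
  induction syms with
  | nil => intro d hd; simp
  | cons s t ih =>
    intro d hd
    have hds : d.contains s = false := hd s (by simp)
    have hnd' : t.Nodup := hnd.of_cons
    have hsnott : s ∉ t := by simp at hnd; exact hnd.1
    simp only [List.foldl_cons]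
    set d1 := d.insert s ([] : List Int) with hd1
    have hc1 : d1.contains s = true := PySem.Dict.contains_insert_self _ _ _
    obtain ⟨hkc, hvc⟩ := constApp s (PySem.List.pyRange 0 (K : Int) 1) d1 hc1
    set d2 := (PySem.List.pyRange 0 (K : Int) 1).foldl
        (fun d _ => d.modify s [] (fun x => x ++ [(1:Int)])) d1 with hd2
    have hd2c : ∀ s' ∈ t, d2.contains s' = false := by
      intro s' hs'
      have hne : s' ≠ s := fun h => hsnott (h ▸ hs')
      have hnm : s' ∉ d2.keys := by
        rw [hkc, hd1, PySem.Dict.keys_insert_of_not_contains _ _ hds]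
        intro hmem
        rcases List.mem_append.mp hmem with h1 | h1
        · exact absurd ((PySem.Dict.contains_iff_mem_keys d s').mpr h1) (by simp [hd s' (by simp [hs'])])
        · simp at h1; exact hne h1
      rw [← Bool.not_eq_true]
      rw [PySem.Dict.contains_iff_mem_keys]
      exact hnm
    obtain ⟨hk, hv⟩ := ih hnd' d2 hd2c
    constructor
    · rw [hk, hkc, hd1, PySem.Dict.keys_insert_of_not_contains _ _ hds]
      simp
    · intro s'
      rw [hv s']
      by_cases hst : s' ∈ t
      · simp [hst]
      · have hmem : (s' ∈ s :: t) ↔ s' = s := by simp [hst]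
        rw [hvc s']
        by_cases hss : s' = s
        · simp [hss, hlen, hd1]
        · simp [hst, hss, hd1, PySem.Dict.getD_insert]

def pvStepA (r : List Char) (d : PySem.Dict String (List Int)) (j : Int) : PySem.Dict String (List Int) :=
  d.modify (String.ofList [PySem.List.pyGetD r j ' ']) []
    (fun l => PySem.List.pySetD l j (PySem.List.pyGetD l j 0 + 1))

def pvRowFold (m : Nat) (r : List Char) (d : PySem.Dict String (List Int)) : PySem.Dict String (List Int) :=
  (List.range m).foldl (fun d (jn : Nat) => pvStepA r d (jn : Int)) d

theorem rowAux (K : Nat) (r : List Char)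
    (hch : ∀ j, j < K → r.getD j ' ' ∈ pvChars)
    (f : Char → Nat → Int) :
    ∀ (m : Nat), m ≤ K → ∀ d : PySem.Dict String (List Int),
      d.keys = pvKeys4 →
      (∀ c ∈ pvChars, d.getD (pvKey c) [] = (List.range K).map (f c)) →
      (pvRowFold m r d).keys = pvKeys4 ∧
      ∀ c ∈ pvChars, (pvRowFold m r d).getD (pvKey c) [] =
        (List.range K).map (fun j => f c j + if j < m ∧ r.getD j ' ' = c then 1 else 0) := by
  intro m
  induction m with
  | zero =>
    intro _ d hk hv
    refine ⟨hk, ?_⟩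
    intro c hc
    rw [pvRowFold]; simp only [List.range_zero, List.foldl_nil]
    rw [hv c hc]
    apply List.map_congr_left
    intro j hj
    simp
  | succ m ih =>
    intro hm d hk hv
    have hmK : m < K := by omega
    obtain ⟨hk1, hv1⟩ := ih (by omega) d hk hv
    have hstep : pvRowFold (m+1) r d = pvStepA r (pvRowFold m r d) (m : Int) := by
      rw [pvRowFold, pvRowFold, List.range_succ, List.foldl_append]; simp
    set e := pvRowFold m r d with he
    set a := r.getD m ' ' with ha
    have hac : a ∈ pvChars := hch m hmK
    have hsym : String.ofList [PySem.List.pyGetD r (m : Int) ' '] = pvKey a := by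
      simp [pvKey, ha]
    -- keys
    have hkeys : (pvStepA r e (m : Int)).keys = pvKeys4 := by
      rw [pvStepA, PySem.Dict.keys_modify, PySem.Dict.keys_insert_of_contains, hk1]
      rw [PySem.Dict.contains_iff_mem_keys, hk1, hsym]
      exact pvKey_mem_keys4 hac
    refine ⟨by rw [hstep]; exact hkeys, ?_⟩
    intro c hc
    rw [hstep, pvStepA, hsym, PySem.Dict.getD_modify]
    by_cases hca : pvKey c = pvKey a
    · have hca' : c = a := pvKey_inj hca
      rw [if_pos hca, hv1 a hac]
      have hget : ((List.range K).map (fun j => f a j + if j < m ∧ r.getD j ' ' = a then 1 else 0)).getD m 0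
          = f a m := by
        rw [List.getD_eq_getElem?_getD]
        simp [hmK]
      simp only [PySem.List.pySetD_natCast, PySem.List.pyGetD_natCast]
      rw [hget, set_map_range _ _ _ _ hmK, hca']
      apply List.map_congr_left
      intro j hj
      simp only [List.mem_range] at hj
      by_cases hjm : j = m
      · subst hjm
        have hcond : (j < j + 1 ∧ r.getD j ' ' = a) := ⟨by omega, ha.symm⟩
        rw [if_pos rfl, if_pos hcond]
      · rw [if_neg hjm]
        have heq : (j < m + 1 ∧ r.getD j ' ' = a) ↔ (j < m ∧ r.getD j ' ' = a) := by
          constructor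
          · rintro ⟨h1, h2⟩; exact ⟨by omega, h2⟩
          · rintro ⟨h1, h2⟩; exact ⟨by omega, h2⟩
        rw [if_congr heq rfl rfl]
    · have hca' : c ≠ a := fun h => hca (h ▸ rfl)
      rw [if_neg hca, hv1 c hc]
      apply List.map_congr_left
      intro j hj
      simp only [List.mem_range] at hj
      have heq : (j < m + 1 ∧ r.getD j ' ' = c) ↔ (j < m ∧ r.getD j ' ' = c) := by
        constructor
        · rintro ⟨h1, h2⟩
          refine ⟨?_, h2⟩
          rcases Nat.lt_succ_iff_lt_or_eq.mp h1 with h | h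
          · exact h
          · exact absurd (ha.trans (h ▸ h2)).symm hca'
        · rintro ⟨h1, h2⟩; exact ⟨by omega, h2⟩
      rw [if_congr heq rfl rfl]

theorem outerAux (K : Nat) (ms : List String)
    (hch : ∀ s ∈ ms, ∀ j, j < K → s.toList.getD j ' ' ∈ pvChars) :
    ∀ (f : Char → Nat → Int) (d : PySem.Dict String (List Int)),
      d.keys = pvKeys4 →
      (∀ c ∈ pvChars, d.getD (pvKey c) [] = (List.range K).map (f c)) →
      (ms.foldl (fun d m => pvRowFold K m.toList d) d).keys = pvKeys4 ∧
      ∀ c ∈ pvChars, (ms.foldl (fun d m => pvRowFold K m.toList d) d).getD (pvKey c) [] =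
        (List.range K).map (fun j => f c j + ((ms.map (fun s => s.toList.getD j ' ')).count c : Int)) := by
  induction ms with
  | nil =>
    intro f d hk hv
    refine ⟨hk, ?_⟩
    intro c hc
    simp only [List.foldl_nil, List.map_nil, List.count_nil, Nat.cast_zero, add_zero]
    exact hv c hc
  | cons s t ih =>
    intro f d hk hv
    have hchs := hch s (by simp)
    have hcht : ∀ s' ∈ t, ∀ j, j < K → s'.toList.getD j ' ' ∈ pvChars :=
      fun s' hs' => hch s' (by simp [hs'])
    obtain ⟨hk1, hv1⟩ := rowAux K s.toList hchs f K le_rfl d hk hv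
    -- normalize the row result to map form for f'
    set f' : Char → Nat → Int := fun c j => f c j + if s.toList.getD j ' ' = c then 1 else 0 with hf'
    have hv1' : ∀ c ∈ pvChars, (pvRowFold K s.toList d).getD (pvKey c) [] = (List.range K).map (f' c) := by
      intro c hc
      rw [hv1 c hc]
      apply List.map_congr_left
      intro j hj
      simp only [List.mem_range] at hj
      simp [hf', hj]
    obtain ⟨hk2, hv2⟩ := ih hcht f' (pvRowFold K s.toList d) hk1 hv1'
    refine ⟨hk2, ?_⟩
    intro c hc
    simp only [List.foldl_cons]
    rw [hv2 c hc]
    apply List.map_congr_left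
    intro j hj
    simp only [hf', List.map_cons, List.count_cons]
    push_cast
    by_cases h : s.toList.getD j ' ' = c
    · simp; ring
    · simp; ring

theorem A_eq_core (m0 : String) (rest : List String)
    (hall : ∀ s ∈ (m0 :: rest), m0.toList.length ≤ s.toList.length ∧
      ∀ c ∈ s.toList.take m0.toList.length, c ∈ (['A', 'C', 'T', 'G'] : List Char)) :
    CountWithPseudocounts (m0 :: rest) = pvItems ((m0 :: rest).map String.toList) m0.toList.length := by
  have hch : ∀ s ∈ (m0 :: rest), ∀ j, j < m0.toList.length → s.toList.getD j ' ' ∈ pvChars := by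
    intro s hs j hj
    obtain ⟨hlen, hc⟩ := hall s hs
    have hjlen : j < s.toList.length := by omega
    have hmem : s.toList.getD j ' ' ∈ s.toList.take m0.toList.length := by
      rw [List.getD_eq_getElem _ _ hjlen]
      have hjt : j < (s.toList.take m0.toList.length).length := by
        rw [List.length_take]; omega
      have hh := List.getElem_mem hjt
      rwa [List.getElem_take] at hh
    exact hc _ hmem
  rw [CountWithPseudocounts]
  have hk : PySem.Str.len (PySem.List.pyGetD (m0 :: rest) 0 "") = ((m0.toList.length : Nat) : Int) := by
    rw [PySem.List.pyGetD_zero_cons, PySem.Str.len_eq]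
  rw [hk]
  -- the initialization loop
  obtain ⟨hk0, hv0⟩ := initFoldA m0.toList.length (["A", "C", "T", "G"]) (by decide)
    PySem.Dict.empty (by simp)
  have hk0' : ((["A", "C", "T", "G"]).foldl
      (fun d sym =>
        (PySem.List.pyRange 0 ((m0.toList.length : Nat) : Int) 1).foldl
          (fun d _ => d.modify sym [] (fun l => l ++ [(1 : Int)]))
          (d.insert sym ([] : List Int))) PySem.Dict.empty).keys = pvKeys4 := by
    rw [hk0]; rfl
  have hv0' : ∀ c ∈ pvChars, ((["A", "C", "T", "G"]).foldl
      (fun d sym =>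
        (PySem.List.pyRange 0 ((m0.toList.length : Nat) : Int) 1).foldl
          (fun d _ => d.modify sym [] (fun l => l ++ [(1 : Int)]))
          (d.insert sym ([] : List Int))) PySem.Dict.empty).getD (pvKey c) [] =
      (List.range m0.toList.length).map (fun _ => (1 : Int)) := by
    intro c hc
    rw [hv0 (pvKey c), if_pos (by fin_cases hc <;> decide)]
    rw [List.map_const']
    simp
  set count0 := (["A", "C", "T", "G"]).foldl
      (fun d sym =>
        (PySem.List.pyRange 0 ((m0.toList.length : Nat) : Int) 1).foldl
          (fun d _ => d.modify sym [] (fun l => l ++ [(1 : Int)]))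
          (d.insert sym ([] : List Int))) PySem.Dict.empty with hc0
  rw [PySem.List.foldl_pyRange_zero_pyGetD' (m0 :: rest) ""
    (fun d m => (PySem.List.pyRange 0 ((m0.toList.length : Nat) : Int) 1).foldl
      (fun d j =>
        d.modify (String.ofList [PySem.List.pyGetD m.toList j ' ']) []
          (fun l => PySem.List.pySetD l j (PySem.List.pyGetD l j 0 + 1)))
      d) count0]
  have hrow : ∀ (m : String) (d : PySem.Dict String (List Int)),
      (PySem.List.pyRange 0 ((m0.toList.length : Nat) : Int) 1).foldl
        (fun d j =>
          d.modify (String.ofList [PySem.List.pyGetD m.toList j ' ']) []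
            (fun l => PySem.List.pySetD l j (PySem.List.pyGetD l j 0 + 1)))
        d = pvRowFold m0.toList.length m.toList d := by
    intro m d
    rw [PySem.List.pyRange_zero_nat, List.foldl_map]
    rfl
  simp only [hrow]
  obtain ⟨hkf, hvf⟩ := outerAux m0.toList.length (m0 :: rest) hch (fun _ _ => 1) count0 hk0' hv0'
  have hnodup : ((m0 :: rest).foldl (fun d m => pvRowFold m0.toList.length m.toList d) count0).keys.Nodup := by
    rw [hkf]; decide
  rw [PySem.Dict.items_eq_map_keys _ hnodup [], hkf]
  have hA := hvf 'A' (by decide)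
  have hC := hvf 'C' (by decide)
  have hT := hvf 'T' (by decide)
  have hG := hvf 'G' (by decide)
  simp only [pvKeys4, List.map_cons, List.map_nil]
  rw [show ("A" : String) = pvKey 'A' from rfl, show ("C" : String) = pvKey 'C' from rfl,
      show ("T" : String) = pvKey 'T' from rfl, show ("G" : String) = pvKey 'G' from rfl,
      hA, hC, hT, hG]
  simp [pvItems, pvTgt, pvKey, List.map_map, Function.comp_def]

theorem A_eq (Motifs : List String) (hpre : Pre_CountWithPseudocounts Motifs) :
    CountWithPseudocounts Motifs = pvItems (Motifs.map String.toList) Motifs.headI.toList.length := by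
  obtain ⟨hne, hall0⟩ := hpre
  have hall : ∀ s ∈ Motifs, Motifs.headI.toList.length ≤ s.toList.length ∧
      ∀ c ∈ s.toList.take Motifs.headI.toList.length, c ∈ (['A', 'C', 'T', 'G'] : List Char) := by
    intro s hs
    obtain ⟨h1, h2⟩ := hall0 s hs
    exact ⟨h1, by simpa using h2⟩
  cases Motifs with
  | nil => exact absurd rfl hne
  | cons m0 rest =>
    have : (m0 :: rest).headI.toList.length = m0.toList.length := by simp
    rw [this]
    exact A_eq_core m0 rest (by simpa using hall)

theorem freq_getD (Motifs : List String) (j : Int) (c : Char) (hc : c ∈ pvChars) :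
    (Motifs.foldl
      (fun f m => f.modify (String.ofList [PySem.List.pyGetD m.toList j ' ']) 0 (· + 1))
      ("ACTG".toList.foldl (fun f c => f.insert (String.ofList [c]) (1 : Int)) PySem.Dict.empty)).getD (pvKey c) 0
    = 1 + ((Motifs.map (fun m => PySem.List.pyGetD m.toList j ' ')).count c : Int) := by
  have hmap : Motifs.foldl
      (fun f m => f.modify (String.ofList [PySem.List.pyGetD m.toList j ' ']) 0 (· + 1))
      ("ACTG".toList.foldl (fun f c => f.insert (String.ofList [c]) (1 : Int)) PySem.Dict.empty)
      = ((Motifs.map (fun m => String.ofList [PySem.List.pyGetD m.toList j ' '])).foldl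
          (fun f x => f.modify x 0 (· + 1))
          ("ACTG".toList.foldl (fun f c => f.insert (String.ofList [c]) (1 : Int)) PySem.Dict.empty)) := by
    rw [List.foldl_map]
  rw [hmap, PySem.Dict.getD_foldl_modify_add_one]
  have hinit : ("ACTG".toList.foldl (fun f c => f.insert (String.ofList [c]) (1 : Int)) PySem.Dict.empty).getD (pvKey c) 0 = 1 := by
    fin_cases hc <;> decide
  rw [hinit]
  have hinj : Function.Injective (fun ch : Char => String.ofList [ch]) := by
    intro a b h; exact pvKey_inj h
  have : (Motifs.map (fun m => String.ofList [PySem.List.pyGetD m.toList j ' '])).count (pvKey c)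
      = (Motifs.map (fun m => PySem.List.pyGetD m.toList j ' ')).count c := by
    rw [show (fun m : String => String.ofList [PySem.List.pyGetD m.toList j ' '])
        = (fun ch : Char => String.ofList [ch]) ∘ (fun m : String => PySem.List.pyGetD m.toList j ' ') from rfl,
      ← List.map_map]
    exact List.count_map_of_injective _ _ hinj _
  rw [this]

theorem B_colv (v : Char → Int) (d : PySem.Dict String (List Int)) (hk : d.keys = pvKeys4) :
    ("ACTG".toList.foldl
      (fun d c => d.modify (String.ofList [c]) [] (fun l => l ++ [v c])) d).keys = pvKeys4 ∧
    ∀ c ∈ pvChars, ("ACTG".toList.foldl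
      (fun d c => d.modify (String.ofList [c]) [] (fun l => l ++ [v c])) d).getD (pvKey c) [] =
      d.getD (pvKey c) [] ++ [v c] := by
  have hACTG : "ACTG".toList = pvChars := by decide
  rw [hACTG]
  constructor
  · rw [PySem.Dict.keys_foldl_modify_key]
    rw [hk]
    decide
  · intro c hc
    show (List.foldl (fun d c => d.modify (String.ofList [c]) [] (fun l => l ++ [v c])) d ['A','C','T','G']).getD (pvKey c) [] = _
    simp only [List.foldl_cons, List.foldl_nil]
    fin_cases hc <;>
      simp [PySem.Dict.getD_modify, pvKey]

theorem B_fold2 (Motifs : List String) (js : List Nat) :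
    ∀ d : PySem.Dict String (List Int), d.keys = pvKeys4 →
      (js.foldl (fun d (jn : Nat) => CountWithPseudocounts_altStep Motifs d (jn : Int)) d).keys = pvKeys4 ∧
      ∀ c ∈ pvChars,
        (js.foldl (fun d (jn : Nat) => CountWithPseudocounts_altStep Motifs d (jn : Int)) d).getD (pvKey c) [] =
          d.getD (pvKey c) [] ++
            js.map (fun j => 1 + ((Motifs.map (fun m => m.toList.getD j ' ')).count c : Int)) := by
  induction js with
  | nil => intro d hk; exact ⟨hk, by intro c hc; simp⟩
  | cons j t ih =>
    intro d hk
    simp only [List.foldl_cons]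
    have hstep : CountWithPseudocounts_altStep Motifs d (j : Int) =
        "ACTG".toList.foldl
          (fun d c => d.modify (String.ofList [c]) []
            (fun l => l ++ [(Motifs.foldl
              (fun f m => f.modify (String.ofList [PySem.List.pyGetD m.toList (j : Int) ' ']) 0 (· + 1))
              ("ACTG".toList.foldl (fun f c => f.insert (String.ofList [c]) (1 : Int)) PySem.Dict.empty)).getD (String.ofList [c]) 0]))
          d := rfl
    obtain ⟨hk1, hv1⟩ := B_colv (fun c => (Motifs.foldl
        (fun f m => f.modify (String.ofList [PySem.List.pyGetD m.toList (j : Int) ' ']) 0 (· + 1))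
        ("ACTG".toList.foldl (fun f c => f.insert (String.ofList [c]) (1 : Int)) PySem.Dict.empty)).getD (String.ofList [c]) 0) d hk
    rw [hstep]
    obtain ⟨hk2, hv2⟩ := ih _ hk1
    refine ⟨hk2, ?_⟩
    intro c hc
    rw [hv2 c hc, hv1 c hc]
    have hfreq := freq_getD Motifs (j : Int) c hc
    simp only [List.map_cons, List.append_assoc, List.cons_append, List.nil_append]
    congr 2
    · rw [show String.ofList [c] = pvKey c from rfl, hfreq]
      simp

theorem B_eq (Motifs : List String) (hpre : Pre_CountWithPseudocounts Motifs) :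
    CountWithPseudocounts_alt Motifs = pvItems (Motifs.map String.toList) Motifs.headI.toList.length := by
  obtain ⟨hne, hall0⟩ := hpre
  cases Motifs with
  | nil => exact absurd rfl hne
  | cons m0 rest =>
    rw [CountWithPseudocounts_alt]
    have hk : PySem.Str.len (PySem.List.pyGetD (m0 :: rest) 0 "") = ((m0.toList.length : Nat) : Int) := by
      rw [PySem.List.pyGetD_zero_cons, PySem.Str.len_eq]
    rw [hk]
    have hk0 : ("ACTG".toList.foldl
        (fun d c => d.insert (String.ofList [c]) ([] : List Int)) PySem.Dict.empty).keys = pvKeys4 := by decide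
    have hconv : (PySem.List.pyRange 0 ((m0.toList.length : Nat) : Int) 1).foldl
          (CountWithPseudocounts_altStep (m0 :: rest))
          ("ACTG".toList.foldl (fun d c => d.insert (String.ofList [c]) ([] : List Int)) PySem.Dict.empty)
        = (List.range m0.toList.length).foldl
          (fun d (jn : Nat) => CountWithPseudocounts_altStep (m0 :: rest) d (jn : Int))
          ("ACTG".toList.foldl (fun d c => d.insert (String.ofList [c]) ([] : List Int)) PySem.Dict.empty) := by
      rw [PySem.List.pyRange_zero_nat, List.foldl_map]
    rw [hconv]
    set DF := (List.range m0.toList.length).foldl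
        (fun d (jn : Nat) => CountWithPseudocounts_altStep (m0 :: rest) d (jn : Int))
        ("ACTG".toList.foldl (fun d c => d.insert (String.ofList [c]) ([] : List Int)) PySem.Dict.empty) with hDF
    obtain ⟨hkf, hvf⟩ := B_fold2 (m0 :: rest) (List.range m0.toList.length) _ hk0
    rw [← hDF] at hkf hvf
    have hg0 : ∀ c ∈ pvChars, ("ACTG".toList.foldl
        (fun d c => d.insert (String.ofList [c]) ([] : List Int)) PySem.Dict.empty).getD (pvKey c) [] = [] := by
      intro c hc; fin_cases hc <;> decide
    have hnodup : DF.keys.Nodup := by rw [hkf]; decide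
    rw [PySem.Dict.items_eq_map_keys _ hnodup [], hkf]
    have hA := hvf 'A' (by decide); rw [hg0 'A' (by decide)] at hA
    have hC := hvf 'C' (by decide); rw [hg0 'C' (by decide)] at hC
    have hT := hvf 'T' (by decide); rw [hg0 'T' (by decide)] at hT
    have hG := hvf 'G' (by decide); rw [hg0 'G' (by decide)] at hG
    simp only [pvKeys4, List.map_cons, List.map_nil]
    rw [show ("A" : String) = pvKey 'A' from rfl, show ("C" : String) = pvKey 'C' from rfl,
        show ("T" : String) = pvKey 'T' from rfl, show ("G" : String) = pvKey 'G' from rfl,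
        hA, hC, hT, hG]
    simp [pvItems, pvTgt, List.map_map, Function.comp_def]
    exact ⟨rfl, rfl, rfl, rfl⟩

-- ===== VERDICT (by name: the statement is the Claim_ definition above) =====
theorem CountWithPseudocounts_spec : Claim_equal_CountWithPseudocounts := by
  intro Motifs _ hpre
  unfold Spec_CountWithPseudocounts
  rw [A_eq Motifs hpre, B_eq Motifs hpre]
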